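-- pv_equiv track=rewrite | github.com/rsiebes/sshoc-nl-cbs-projects-table-to-turtle | excel_to_turtle.py | classify_organization
-- ===== SOURCE A (Python) =====
-- def classify_organization(org_name):
--     """Classify organization type based on name patterns."""
--     name_lower = org_name.lower()
--
--     if any(word in name_lower for word in ['universiteit', 'university', 'hogeschool', 'college']):
--         return 'schema:EducationalOrganization'
--     elif any(word in name_lower for word in ['ministerie', 'ministry', 'gemeente', 'provincie', 'government']):
--         return 'schema:GovernmentOrganization'
--     elif any(word in name_lower for word in ['onderzoek', 'research', 'instituut', 'institute', 'planbureau']):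
--         return 'schema:ResearchOrganization'
--     elif any(word in name_lower for word in ['bv', 'nv', 'ltd', 'inc', 'corp', 'company']):
--         return 'schema:Corporation'
--     else:
--         return 'schema:Organization'
-- ===== SOURCE B (Python) =====
-- # Different algorithm: one left-to-right scan over the text; at each position check
-- # which keyword starts there and keep the minimum priority rank seen, then map the
-- # best rank to its label.  (A instead asks, per category, whether any keyword is a
-- # substring, in four staged checks.)  Correct because "kw occurs as a substring"
-- # iff "kw starts at some position", and first-matching-category = minimum rank.
--
-- _KEYWORD_RANK = {
--     'universiteit': 0, 'university': 0, 'hogeschool': 0, 'college': 0,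
--     'ministerie': 1, 'ministry': 1, 'gemeente': 1, 'provincie': 1, 'government': 1,
--     'onderzoek': 2, 'research': 2, 'instituut': 2, 'institute': 2, 'planbureau': 2,
--     'bv': 3, 'nv': 3, 'ltd': 3, 'inc': 3, 'corp': 3, 'company': 3,
-- }
--
-- _LABELS = [
--     'schema:EducationalOrganization',
--     'schema:GovernmentOrganization',
--     'schema:ResearchOrganization',
--     'schema:Corporation',
--     'schema:Organization',
-- ]
--
-- def classify_organization(org_name):
--     """Classify organization type based on name patterns."""
--     name = org_name.lower()
--     best = 4
--     for i in range(len(name)):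
--         for kw, rank in _KEYWORD_RANK.items():
--             if rank < best and name.startswith(kw, i):
--                 best = rank
--     return _LABELS[best]
-- ===== Notes on version B (the rewrite author's own statement) =====
-- stated objective: alternative
-- what changed: Replaced the four staged any-substring elif checks by a single left-to-right scan over the text that, at each position, checks which keyword starts there and keeps the minimum category rank, mapping the best rank to its label at the end.
import Mathlib
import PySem

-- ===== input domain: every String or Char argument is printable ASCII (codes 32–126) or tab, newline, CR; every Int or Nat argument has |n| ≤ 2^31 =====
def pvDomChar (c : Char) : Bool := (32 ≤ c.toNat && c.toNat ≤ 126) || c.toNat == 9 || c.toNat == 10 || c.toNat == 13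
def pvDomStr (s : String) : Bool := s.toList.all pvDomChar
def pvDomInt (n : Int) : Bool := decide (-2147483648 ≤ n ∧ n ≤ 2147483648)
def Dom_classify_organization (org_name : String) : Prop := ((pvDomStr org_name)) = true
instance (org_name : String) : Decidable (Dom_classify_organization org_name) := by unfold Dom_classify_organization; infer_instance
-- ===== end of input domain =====

-- B replaces A's four staged any-substring checks by one left-to-right scan over the
-- text that keeps the minimum matching category rank; same results (alternative algorithm).


-- ===== PORT A =====
def classify_organization (org_name : String) : String :=
  let name_lower := PySem.Str.lower org_name
  if ["universiteit", "university", "hogeschool", "college"].any (fun word => PySem.Str.isIn word name_lower) then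
    "schema:EducationalOrganization"
  else if ["ministerie", "ministry", "gemeente", "provincie", "government"].any (fun word => PySem.Str.isIn word name_lower) then
    "schema:GovernmentOrganization"
  else if ["onderzoek", "research", "instituut", "institute", "planbureau"].any (fun word => PySem.Str.isIn word name_lower) then
    "schema:ResearchOrganization"
  else if ["bv", "nv", "ltd", "inc", "corp", "company"].any (fun word => PySem.Str.isIn word name_lower) then
    "schema:Corporation"
  else
    "schema:Organization"

-- ===== PORT B =====
-- the keyword -> rank dict, in insertion order
def kwRanks : List (List Char × Nat) :=
  [("universiteit".toList, 0), ("university".toList, 0), ("hogeschool".toList, 0), ("college".toList, 0),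
   ("ministerie".toList, 1), ("ministry".toList, 1), ("gemeente".toList, 1), ("provincie".toList, 1), ("government".toList, 1),
   ("onderzoek".toList, 2), ("research".toList, 2), ("instituut".toList, 2), ("institute".toList, 2), ("planbureau".toList, 2),
   ("bv".toList, 3), ("nv".toList, 3), ("ltd".toList, 3), ("inc".toList, 3), ("corp".toList, 3), ("company".toList, 3)]

def orgLabels : List String :=
  ["schema:EducationalOrganization", "schema:GovernmentOrganization",
   "schema:ResearchOrganization", "schema:Corporation", "schema:Organization"]

-- the inner dict loop body: `if rank < best and name.startswith(kw, i): best = rank`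
def stepf (s : List Char) (b : Nat) (p : List Char × Nat) : Nat :=
  if p.2 < b && PySem.Chars.startswith s p.1 then p.2 else b

-- `for i in range(len(name))` with `name.startswith(kw, i)` rendered as the
-- equivalent structural recursion over suffixes of the char list (exact: each
-- iteration i sees the suffix starting at i)
def bestScan : List Char → Nat → Nat
  | [], best => best
  | c :: t, best => bestScan t (kwRanks.foldl (stepf (c :: t)) best)

def classify_organization_alt (org_name : String) : String :=
  let name := PySem.Str.lower org_name
  orgLabels.getD (bestScan name.toList 4) ""

-- ===== PRECONDITION & SPEC =====
def Spec_classify_organization (org_name : String) (out : String) : Prop := out = classify_organization_alt org_name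
instance (org_name : String) (out : String) : Decidable (Spec_classify_organization org_name out) := by unfold Spec_classify_organization; infer_instance

-- ===== CLAIM (what is proved, stated in full; the proofs are below) =====
def Claim_equal_classify_organization : Prop := ∀ (org_name : String), Dom_classify_organization org_name → Spec_classify_organization org_name (classify_organization org_name)

-- ===== LEMMAS AND PROOFS =====

-- keyword groups (char-list side) and the "some keyword of the group occurs" predicate
def eduL : List (List Char) := ["universiteit".toList, "university".toList, "hogeschool".toList, "college".toList]
def govL : List (List Char) := ["ministerie".toList, "ministry".toList, "gemeente".toList, "provincie".toList, "government".toList]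
def resL : List (List Char) := ["onderzoek".toList, "research".toList, "instituut".toList, "institute".toList, "planbureau".toList]
def corpL : List (List Char) := ["bv".toList, "nv".toList, "ltd".toList, "inc".toList, "corp".toList, "company".toList]

def occ (G : List (List Char)) (s : List Char) : Bool := G.any (fun kw => PySem.Chars.isIn kw s)

-- the "priority rank" of s: minimum rank whose group occurs, 4 if none
def R : List Char → Nat
  | [] => 4
  | c :: t => min (kwRanks.foldl (stepf (c :: t)) 4) (R t)

lemma stepf_eq (s : List Char) (b : Nat) (p : List Char × Nat) :
    stepf s b p = if PySem.Chars.startswith s p.1 then min b p.2 else b := by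
  cases h : PySem.Chars.startswith s p.1
  · simp [stepf, h]
  · simp [stepf, h, Nat.min_def]
    split_ifs <;> omega

lemma foldl_stepf_min (s : List Char) :
    ∀ (L : List (List Char × Nat)) (b c : Nat),
      L.foldl (stepf s) (min b c) = min b (L.foldl (stepf s) c) := by
  intro L
  induction L with
  | nil => intro b c; rfl
  | cons p rest ih =>
      intro b c
      simp only [List.foldl_cons, stepf_eq]
      cases h : PySem.Chars.startswith s p.1
      all_goals simp [Nat.min_assoc, ih]

lemma foldl_stepf_le (s : List Char) :
    ∀ (L : List (List Char × Nat)) (b : Nat), L.foldl (stepf s) b ≤ b := by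
  intro L
  induction L with
  | nil => intro b; exact le_refl b
  | cons p rest ih =>
      intro b
      simp only [List.foldl_cons, stepf_eq]
      cases h : PySem.Chars.startswith s p.1
      · simpa using ih b
      · exact le_trans (ih _) (Nat.min_le_left _ _)

lemma bestScan_eq (s : List Char) : ∀ b : Nat, b ≤ 4 → bestScan s b = min b (R s) := by
  induction s with
  | nil => intro b hb; simp [bestScan, R]; omega
  | cons c t ih =>
      intro b hb
      have hb4 : b = min b 4 := by omega
      have hfold : kwRanks.foldl (stepf (c :: t)) b
          = min b (kwRanks.foldl (stepf (c :: t)) 4) := by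
        conv_lhs => rw [hb4]
        exact foldl_stepf_min (c :: t) kwRanks b 4
      have hle : kwRanks.foldl (stepf (c :: t)) b ≤ b := foldl_stepf_le _ _ _
      show bestScan t (kwRanks.foldl (stepf (c :: t)) b) = min b (R (c :: t))
      rw [ih _ (le_trans hle hb), hfold]
      simp [R, Nat.min_assoc]

lemma R_le_four (s : List Char) : R s ≤ 4 := by
  induction s with
  | nil => exact le_refl 4
  | cons c t ih => exact le_trans (Nat.min_le_right _ _) ih

lemma isIn_cons (kw : List Char) (c : Char) (t : List Char) :
    PySem.Chars.isIn kw (c :: t)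
      = (PySem.Chars.startswith (c :: t) kw || PySem.Chars.isIn kw t) := by
  rw [Bool.eq_iff_iff]
  simp [PySem.Chars.isIn_iff_infix, PySem.Chars.startswith_iff, List.infix_cons_iff]

lemma foldl_le_of_mem (s : List Char) :
    ∀ (L : List (List Char × Nat)) (kw : List Char) (r b : Nat),
      (kw, r) ∈ L → PySem.Chars.startswith s kw = true →
      L.foldl (stepf s) b ≤ r := by
  intro L
  induction L with
  | nil => intro kw r b h; exact absurd h (List.not_mem_nil)
  | cons p rest ih =>
      intro kw r b hmem hsw
      rcases List.mem_cons.mp hmem with h | h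
      · subst h
        simp only [List.foldl_cons, stepf_eq, hsw]
        exact le_trans (foldl_stepf_le _ _ _) (Nat.min_le_right _ _)
      · exact ih kw r _ h hsw

lemma R_le_of_occ : ∀ (s kw : List Char) (r : Nat),
    (kw, r) ∈ kwRanks → PySem.Chars.isIn kw s = true → R s ≤ r := by
  intro s
  induction s with
  | nil =>
      intro kw r hmem hin
      have hkw : kw = [] := by
        simpa [PySem.Chars.isIn_iff_infix] using hin
      subst hkw
      exfalso
      simp [kwRanks, Prod.mk.injEq] at hmem
  | cons c t ih =>
      intro kw r hmem hin
      rw [isIn_cons] at hin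
      rcases Bool.or_eq_true_iff.mp hin with h | h
      · exact le_trans (Nat.min_le_left _ _) (foldl_le_of_mem _ _ kw r 4 hmem h)
      · exact le_trans (Nat.min_le_right _ _) (ih kw r hmem h)

lemma foldl_cases (s : List Char) :
    ∀ (L : List (List Char × Nat)) (b : Nat),
      L.foldl (stepf s) b = b ∨
      ∃ kw, (kw, L.foldl (stepf s) b) ∈ L ∧ PySem.Chars.startswith s kw = true := by
  intro L
  induction L with
  | nil => intro b; exact Or.inl rfl
  | cons p rest ih =>
      intro b
      rcases p with ⟨kw0, r0⟩
      simp only [List.foldl_cons]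
      rcases ih (stepf s b (kw0, r0)) with h | ⟨kw, hmem, hsw⟩
      · rw [h, stepf_eq]
        cases hsw : PySem.Chars.startswith s kw0
        · exact Or.inl (by simp)
        · by_cases hmin : min b r0 = b
          · exact Or.inl hmin
          · refine Or.inr ⟨kw0, ?_, hsw⟩
            have : min b r0 = r0 := by omega
            rw [this]; exact List.mem_cons_self
      · exact Or.inr ⟨kw, List.mem_cons_of_mem _ hmem, hsw⟩

lemma R_cases : ∀ s : List Char,
    R s = 4 ∨ ∃ kw, (kw, R s) ∈ kwRanks ∧ PySem.Chars.isIn kw s = true := by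
  intro s
  induction s with
  | nil => exact Or.inl rfl
  | cons c t ih =>
      have hH := foldl_cases (c :: t) kwRanks 4
      set H := kwRanks.foldl (stepf (c :: t)) 4 with hHdef
      have hR : R (c :: t) = min H (R t) := rfl
      by_cases hcmp : H ≤ R t
      · have hmin : min H (R t) = H := Nat.min_eq_left hcmp
        rcases hH with h4 | ⟨kw, hmem, hsw⟩
        · have : R t = 4 := le_antisymm (R_le_four t) (h4 ▸ hcmp)
          exact Or.inl (by rw [hR, hmin, h4])
        · refine Or.inr ⟨kw, by rw [hR, hmin]; exact hmem, ?_⟩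
          rw [isIn_cons, hsw]; simp
      · have hmin : min H (R t) = R t := by omega
        rcases ih with h4 | ⟨kw, hmem, hin⟩
        · exfalso
          have : H ≤ 4 := foldl_stepf_le _ _ _
          omega
        · refine Or.inr ⟨kw, by rw [hR, hmin]; exact hmem, ?_⟩
          rw [isIn_cons, hin]; simp

lemma mem_kwRanks_rank (kw : List Char) (r : Nat) (h : (kw, r) ∈ kwRanks) :
    (r = 0 ∧ kw ∈ eduL) ∨ (r = 1 ∧ kw ∈ govL) ∨ (r = 2 ∧ kw ∈ resL) ∨ (r = 3 ∧ kw ∈ corpL) := by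
  simp only [kwRanks, List.mem_cons, List.not_mem_nil, or_false, Prod.mk.injEq] at h
  simp only [eduL, govL, resL, corpL, List.mem_cons, List.not_mem_nil, or_false]
  rcases h with ⟨h1,h2⟩|⟨h1,h2⟩|⟨h1,h2⟩|⟨h1,h2⟩|⟨h1,h2⟩|⟨h1,h2⟩|⟨h1,h2⟩|⟨h1,h2⟩|⟨h1,h2⟩|⟨h1,h2⟩|⟨h1,h2⟩|⟨h1,h2⟩|⟨h1,h2⟩|⟨h1,h2⟩|⟨h1,h2⟩|⟨h1,h2⟩|⟨h1,h2⟩|⟨h1,h2⟩|⟨h1,h2⟩|⟨h1,h2⟩ <;>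
    subst h2 <;> simp [h1]

lemma mem_group_rank (kw : List Char) (r : Nat)
    (h : (r = 0 ∧ kw ∈ eduL) ∨ (r = 1 ∧ kw ∈ govL) ∨ (r = 2 ∧ kw ∈ resL) ∨ (r = 3 ∧ kw ∈ corpL)) :
    (kw, r) ∈ kwRanks := by
  simp only [eduL, govL, resL, corpL, List.mem_cons, List.not_mem_nil, or_false] at h
  simp only [kwRanks, List.mem_cons, List.not_mem_nil, or_false, Prod.mk.injEq]
  rcases h with ⟨rfl, hm⟩ | ⟨rfl, hm⟩ | ⟨rfl, hm⟩ | ⟨rfl, hm⟩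
  · rcases hm with rfl|rfl|rfl|rfl <;> simp
  · rcases hm with rfl|rfl|rfl|rfl|rfl <;> simp
  · rcases hm with rfl|rfl|rfl|rfl|rfl <;> simp
  · rcases hm with rfl|rfl|rfl|rfl|rfl|rfl <;> simp

lemma R_char (s : List Char) :
    R s = (if occ eduL s then 0 else if occ govL s then 1 else
           if occ resL s then 2 else if occ corpL s then 3 else 4) := by
  have hocc : ∀ (G : List (List Char)) (r : Nat), occ G s = true →
      (∀ kw ∈ G, (kw, r) ∈ kwRanks) → R s ≤ r := by
    intro G r hG hmem
    rcases List.any_eq_true.mp hG with ⟨kw, hkw, hin⟩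
    exact R_le_of_occ s kw r (hmem kw hkw) hin
  have hcase := R_cases s
  split_ifs with h0 h1 h2 h3
  · have := hocc eduL 0 h0 (fun kw hk => mem_group_rank kw 0 (Or.inl ⟨rfl, hk⟩))
    omega
  · have hle := hocc govL 1 h1 (fun kw hk => mem_group_rank kw 1 (Or.inr (Or.inl ⟨rfl, hk⟩)))
    rcases hcase with h4 | ⟨kw, hmem, hin⟩
    · omega
    · rcases mem_kwRanks_rank kw (R s) hmem with ⟨hr, hk⟩|⟨hr, hk⟩|⟨hr, hk⟩|⟨hr, hk⟩
      · exact absurd (List.any_eq_true.mpr ⟨kw, hk, hin⟩) (by simpa [occ] using h0)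
      · exact hr
      · omega
      · omega
  · have hle := hocc resL 2 h2 (fun kw hk => mem_group_rank kw 2 (Or.inr (Or.inr (Or.inl ⟨rfl, hk⟩))))
    rcases hcase with h4 | ⟨kw, hmem, hin⟩
    · omega
    · rcases mem_kwRanks_rank kw (R s) hmem with ⟨hr, hk⟩|⟨hr, hk⟩|⟨hr, hk⟩|⟨hr, hk⟩
      · exact absurd (List.any_eq_true.mpr ⟨kw, hk, hin⟩) (by simpa [occ] using h0)
      · exact absurd (List.any_eq_true.mpr ⟨kw, hk, hin⟩) (by simpa [occ] using h1)
      · exact hr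
      · omega
  · have hle := hocc corpL 3 h3 (fun kw hk => mem_group_rank kw 3 (Or.inr (Or.inr (Or.inr ⟨rfl, hk⟩))))
    rcases hcase with h4 | ⟨kw, hmem, hin⟩
    · omega
    · rcases mem_kwRanks_rank kw (R s) hmem with ⟨hr, hk⟩|⟨hr, hk⟩|⟨hr, hk⟩|⟨hr, hk⟩
      · exact absurd (List.any_eq_true.mpr ⟨kw, hk, hin⟩) (by simpa [occ] using h0)
      · exact absurd (List.any_eq_true.mpr ⟨kw, hk, hin⟩) (by simpa [occ] using h1)
      · exact absurd (List.any_eq_true.mpr ⟨kw, hk, hin⟩) (by simpa [occ] using h2)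
      · exact hr
  · rcases hcase with h4 | ⟨kw, hmem, hin⟩
    · exact h4
    · rcases mem_kwRanks_rank kw (R s) hmem with ⟨hr, hk⟩|⟨hr, hk⟩|⟨hr, hk⟩|⟨hr, hk⟩
      · exact absurd (List.any_eq_true.mpr ⟨kw, hk, hin⟩) (by simpa [occ] using h0)
      · exact absurd (List.any_eq_true.mpr ⟨kw, hk, hin⟩) (by simpa [occ] using h1)
      · exact absurd (List.any_eq_true.mpr ⟨kw, hk, hin⟩) (by simpa [occ] using h2)
      · exact absurd (List.any_eq_true.mpr ⟨kw, hk, hin⟩) (by simpa [occ] using h3)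

-- ===== VERDICT (by name: the statement is the Claim_ definition above) =====
theorem classify_organization_spec : Claim_equal_classify_organization := by
  intro org_name _
  unfold Spec_classify_organization classify_organization classify_organization_alt
  have hbs : bestScan (PySem.Str.lower org_name).toList 4
      = R (PySem.Str.lower org_name).toList := by
    rw [bestScan_eq _ 4 (le_refl 4)]
    have := R_le_four (PySem.Str.lower org_name).toList
    omega
  simp only [hbs, R_char, occ, eduL, govL, resL, corpL, List.any_cons, List.any_nil,
    Bool.or_false, PySem.Str.isIn_eq]
  split_ifs <;> simp [orgLabels]
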